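-- pv_equiv track=rewrite | github.com/chandlerlei2017/ECE208 | Q2_DPLL.py | BCP
-- ===== SOURCE A (Python) =====
-- def BCP(clauses, var):
--     i = 0
--
--     while (i < len(clauses)):
--         if var in clauses[i]:
--             del clauses[i]
--             i -= 1
--         elif -var in clauses[i] and len(clauses[i]) != 0:
--             clauses[i].remove(-var)
--         elif -var in clauses[i]:
--             return 0
--         i += 1
--
--
--
--     if len(clauses) == 0:
--         return 1
--     else:
--         return 2
-- ===== SOURCE B (Python) =====
-- def BCP(clauses, var):
--     # Two clean passes: drop satisfied clauses (slice assignment mutates the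
--     # caller's list, same as A's dels), then strip the opposite literal.
--     clauses[:] = [c for c in clauses if var not in c]
--     for c in clauses:
--         if -var in c:
--             c.remove(-var)
--     return 1 if not clauses else 2
-- ===== Notes on version B (the rewrite author's own statement) =====
-- stated objective: simpler
-- what changed: Replaces A's single index-walking while loop with del/i-=1 bookkeeping (and a dead return-0 branch) by two plain passes: a filter comprehension assigned back in place, then a loop stripping -var from survivors.
import Mathlib
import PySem

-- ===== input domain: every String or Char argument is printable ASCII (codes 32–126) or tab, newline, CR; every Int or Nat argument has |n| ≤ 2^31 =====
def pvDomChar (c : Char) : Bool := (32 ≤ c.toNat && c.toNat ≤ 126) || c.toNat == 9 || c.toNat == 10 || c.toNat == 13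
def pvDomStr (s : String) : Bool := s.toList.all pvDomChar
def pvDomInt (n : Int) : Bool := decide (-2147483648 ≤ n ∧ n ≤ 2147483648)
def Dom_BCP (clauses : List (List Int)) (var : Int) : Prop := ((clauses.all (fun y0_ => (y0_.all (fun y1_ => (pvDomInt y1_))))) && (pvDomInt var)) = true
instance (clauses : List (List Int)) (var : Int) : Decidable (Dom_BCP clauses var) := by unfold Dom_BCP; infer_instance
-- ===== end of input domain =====

-- ===== PORT A =====
-- B simplifies A's index-walking while loop into two plain passes (filter, then strip -var);
-- same in-place mutation of the caller's list; same return value.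
-- Literal port of A's while loop over the mutating list: recursion over the suffix;
-- 'none' models the (unreachable) 'return 0' branch.
def BCP_go (var : Int) (cs : List (List Int)) : Option (List (List Int)) :=
  match cs with
  | [] => some []
  | c :: rest =>
    if c.contains var then BCP_go var rest
    else if c.contains (-var) && c.length != 0 then
      (BCP_go var rest).map (((PySem.List.remove? c (-var)).getD c) :: ·)
    else if c.contains (-var) then none
    else (BCP_go var rest).map (c :: ·)

def BCP (clauses : List (List Int)) (var : Int) : Int :=
  match BCP_go var clauses with
  | none => 0
  | some l => if l.length = 0 then 1 else 2

-- ===== PORT B =====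
def BCP_alt (clauses : List (List Int)) (var : Int) : Int :=
  let kept := clauses.filter (fun c => !c.contains var)
  let stripped := kept.map (fun c =>
    if c.contains (-var) then (PySem.List.remove? c (-var)).getD c else c)
  if stripped.isEmpty then 1 else 2

-- ===== PRECONDITION & SPEC =====
def Spec_BCP (clauses : List (List Int)) (var : Int) (out : Int) : Prop := out = BCP_alt clauses var
instance (clauses : List (List Int)) (var : Int) (out : Int) : Decidable (Spec_BCP clauses var out) := by unfold Spec_BCP; infer_instance

-- ===== CLAIM (what is proved, stated in full; the proofs are below) =====
def Claim_equal_BCP : Prop := ∀ (clauses : List (List Int)) (var : Int), Dom_BCP clauses var → Spec_BCP clauses var (BCP clauses var)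

-- ===== LEMMAS AND PROOFS =====
theorem BCP_go_eq (var : Int) (cs : List (List Int)) :
    BCP_go var cs = some ((cs.filter (fun c => !c.contains var)).map (fun c =>
      if c.contains (-var) then (PySem.List.remove? c (-var)).getD c else c)) := by
  induction cs with
  | nil => rfl
  | cons c rest ih =>
    simp only [BCP_go, List.filter_cons]
    by_cases h : var ∈ c
    · simp [h, ih]
    · by_cases hm : (-var) ∈ c
      · have hne : ¬c = [] := by rintro rfl; simp at hm
        simp [h, hm, hne, ih]
      · simp [h, hm, ih]

-- ===== VERDICT (by name: the statement is the Claim_ definition above) =====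
theorem BCP_spec : Claim_equal_BCP := by
  intro clauses var _
  unfold Spec_BCP BCP BCP_alt
  rw [BCP_go_eq]
  simp
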